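-- pv_equiv track=rewrite | github.com/VicBar11/Progra2-IO | secuencias.py | evaluar_secuencias
-- ===== SOURCE A (Python) =====
-- def evaluar_secuencias(hilera1, hilera2):
--     score = 0
--     for i in range(len(hilera1)):
--         if hilera1[i] == hilera2[i]:
--             score += 1
--         elif hilera1[i] == '_' or hilera2[i] == '_':
--             score -= 2
--         elif hilera1[i] != hilera2[i]:
--             score -= 1
--     return score
-- ===== SOURCE B (Python) =====
-- def evaluar_secuencias(hilera1, hilera2):
--     n = len(hilera1)
--     matches = sum(1 for i in range(n) if hilera1[i] == hilera2[i])
--     gaps = sum(1 for i in range(n)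
--                if hilera1[i] != hilera2[i] and (hilera1[i] == '_' or hilera2[i] == '_'))
--     return 2 * matches - gaps - n
-- ===== Notes on version B (the rewrite author's own statement) =====
-- stated objective: alternative
-- what changed: Replaces the single accumulator loop with three-way branching by two independent counts (matches and gap-mismatches) over the index range, combined by the closed form 2*matches - gaps - n.
import Mathlib
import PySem

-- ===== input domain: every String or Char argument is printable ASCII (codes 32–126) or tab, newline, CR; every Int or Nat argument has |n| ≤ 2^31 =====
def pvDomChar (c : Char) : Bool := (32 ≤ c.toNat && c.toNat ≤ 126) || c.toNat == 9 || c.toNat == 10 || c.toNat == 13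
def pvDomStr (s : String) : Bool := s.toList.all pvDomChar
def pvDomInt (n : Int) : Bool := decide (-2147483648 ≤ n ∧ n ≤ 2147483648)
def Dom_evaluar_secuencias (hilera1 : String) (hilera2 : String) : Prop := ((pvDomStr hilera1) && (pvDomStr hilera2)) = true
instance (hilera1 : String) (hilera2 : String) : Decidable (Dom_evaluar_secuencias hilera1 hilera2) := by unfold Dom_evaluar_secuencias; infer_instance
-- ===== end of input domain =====

-- B replaces A's single three-branch accumulator loop by two independent counts plus the closed form 2*matches - gaps - n (objective: alternative decomposition, same cost).


-- ===== PORT A =====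
-- literal transliteration of A's loop: score accumulator over range(len(hilera1));
-- indexing via PySem.Str.pyGet? (none = IndexError, excluded by Pre_)
def evaluar_secuencias (hilera1 : String) (hilera2 : String) : Int :=
  (PySem.List.pyRange 0 (hilera1.toList.length : Int) 1).foldl (fun score i =>
    match PySem.Str.pyGet? hilera1 i, PySem.Str.pyGet? hilera2 i with
    | some c1, some c2 =>
      if c1 = c2 then score + 1
      else if c1 = '_' ∨ c2 = '_' then score - 2
      else if c1 ≠ c2 then score - 1
      else score
    | _, _ => score) 0

-- ===== PORT B =====
-- transliteration of Source B: two counts over range(n) (the two 0/1 generator sums), then 2*matches - gaps - n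
def evaluar_secuencias_alt (hilera1 : String) (hilera2 : String) : Int :=
  let n : Int := hilera1.toList.length
  let nmatch : Int :=
    ((PySem.List.pyRange 0 n 1).countP (fun i =>
      PySem.Str.pyGet? hilera1 i == PySem.Str.pyGet? hilera2 i) : Nat)
  let gaps : Int :=
    ((PySem.List.pyRange 0 n 1).countP (fun i =>
      PySem.Str.pyGet? hilera1 i != PySem.Str.pyGet? hilera2 i &&
      (PySem.Str.pyGet? hilera1 i == some '_' || PySem.Str.pyGet? hilera2 i == some '_')) : Nat)
  2 * nmatch - gaps - n

-- ===== PRECONDITION & SPEC =====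
-- Pre_ excludes exactly the inputs where A raises IndexError: hilera2 shorter than hilera1.
def Pre_evaluar_secuencias (hilera1 : String) (hilera2 : String) : Prop :=
  hilera1.toList.length ≤ hilera2.toList.length
instance (hilera1 : String) (hilera2 : String) : Decidable (Pre_evaluar_secuencias hilera1 hilera2) := by unfold Pre_evaluar_secuencias; infer_instance
def pvWitness_evaluar_secuencias : String × String := ("A_C", "ABC")

def Spec_evaluar_secuencias (hilera1 : String) (hilera2 : String) (out : Int) : Prop := out = evaluar_secuencias_alt hilera1 hilera2
instance (hilera1 : String) (hilera2 : String) (out : Int) : Decidable (Spec_evaluar_secuencias hilera1 hilera2 out) := by unfold Spec_evaluar_secuencias; infer_instance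

-- ===== CLAIM (what is proved, stated in full; the proofs are below) =====
def Claim_equal_evaluar_secuencias : Prop := ∀ (hilera1 : String) (hilera2 : String), Dom_evaluar_secuencias hilera1 hilera2 → Pre_evaluar_secuencias hilera1 hilera2 → Spec_evaluar_secuencias hilera1 hilera2 (evaluar_secuencias hilera1 hilera2)

-- ===== LEMMAS AND PROOFS =====

-- the per-index step of A's loop
def pvStepA (hilera1 hilera2 : String) (score i : Int) : Int :=
  match PySem.Str.pyGet? hilera1 i, PySem.Str.pyGet? hilera2 i with
  | some c1, some c2 =>
    if c1 = c2 then score + 1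
    else if c1 = '_' ∨ c2 = '_' then score - 2
    else if c1 ≠ c2 then score - 1
    else score
  | _, _ => score

-- A's fold over any index list of in-range indices equals the closed form of B's counts.
theorem pvKey (hilera1 hilera2 : String) (L : List Int)
    (hv : ∀ i ∈ L, (PySem.Str.pyGet? hilera1 i).isSome ∧ (PySem.Str.pyGet? hilera2 i).isSome)
    (s : Int) :
    L.foldl (pvStepA hilera1 hilera2) s =
      s + 2 * (L.countP (fun i => PySem.Str.pyGet? hilera1 i == PySem.Str.pyGet? hilera2 i) : Int)
        - (L.countP (fun i =>
            PySem.Str.pyGet? hilera1 i != PySem.Str.pyGet? hilera2 i &&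
            (PySem.Str.pyGet? hilera1 i == some '_' || PySem.Str.pyGet? hilera2 i == some '_')) : Int)
        - L.length := by
  induction L generalizing s with
  | nil => simp
  | cons a t ih =>
    obtain ⟨h1, h2⟩ := hv a (List.mem_cons_self ..)
    obtain ⟨c1, hc1⟩ := Option.isSome_iff_exists.mp h1
    obtain ⟨c2, hc2⟩ := Option.isSome_iff_exists.mp h2
    have := ih (fun i hi => hv i (List.mem_cons_of_mem _ hi))
    simp only [List.foldl_cons, List.countP_cons, List.length_cons]
    rw [this]
    unfold pvStepA
    rw [hc1, hc2]
    by_cases hEq : c1 = c2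
    · subst hEq
      simp
      omega
    · have hne : (some c1 == some c2) = false := by
        simp [hEq]
      by_cases hg : c1 = '_' ∨ c2 = '_'
      · have : ((some c1 != some c2) &&
            (some c1 == some '_' || some c2 == some '_')) = true := by
          simp [hEq]
          tauto
        simp [hEq, hg, hne]
        omega
      · have : ((some c1 != some c2) &&
            (some c1 == some '_' || some c2 == some '_')) = false := by
          push Not at hg
          simp [hg.1, hg.2]
        simp [hEq, hg, hne]
        omega

theorem pvValid (hilera1 hilera2 : String)
    (hpre : hilera1.toList.length ≤ hilera2.toList.length) :
    ∀ i ∈ PySem.List.pyRange 0 (hilera1.toList.length : Int) 1,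
      (PySem.Str.pyGet? hilera1 i).isSome ∧ (PySem.Str.pyGet? hilera2 i).isSome := by
  intro i hi
  rw [PySem.List.mem_pyRange_one] at hi
  obtain ⟨h0, hlt⟩ := hi
  have hi' : i = ((i.toNat : Nat) : Int) := (Int.toNat_of_nonneg h0).symm
  have hlt1 : i.toNat < hilera1.toList.length := by omega
  have hlt2 : i.toNat < hilera2.toList.length := by omega
  constructor
  · rw [hi', PySem.Str.pyGet?_natCast]
    simp [List.getElem?_eq_getElem hlt1]
  · rw [hi', PySem.Str.pyGet?_natCast]
    simp [List.getElem?_eq_getElem hlt2]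

-- ===== VERDICT (by name: the statement is the Claim_ definition above) =====
theorem evaluar_secuencias_spec : Claim_equal_evaluar_secuencias := by
  intro hilera1 hilera2 _ hpre
  unfold Spec_evaluar_secuencias evaluar_secuencias evaluar_secuencias_alt
  rw [show (fun (score i : Int) =>
      match PySem.Str.pyGet? hilera1 i, PySem.Str.pyGet? hilera2 i with
      | some c1, some c2 =>
        if c1 = c2 then score + 1
        else if c1 = '_' ∨ c2 = '_' then score - 2
        else if c1 ≠ c2 then score - 1
        else score
      | _, _ => score) = pvStepA hilera1 hilera2 from rfl]
  rw [pvKey hilera1 hilera2 _ (pvValid hilera1 hilera2 hpre) 0]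
  simp [PySem.List.length_pyRange_one]
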